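-- pv_equiv track=rewrite | github.com/metantonio/open-first-agent | code_converter_agent/sas_to_python_converter.py | _split_into_statements
-- ===== SOURCE A (Python) =====
-- from typing import Dict, List, Optional, Tuple, Union
--
-- def _split_into_statements(code: str) -> List[str]:
--     """Split SAS code into individual statements."""
--     # Basic splitting by semicolon, but preserve semicolons in quoted strings
--     statements = []
--     current = []
--     in_quotes = False
--     quote_char = None
--
--     for char in code:
--         if char in ["'", '"'] and not in_quotes:
--             in_quotes = True
--             quote_char = char
--         elif char == quote_char and in_quotes:
--             in_quotes = False
--
--         current.append(char)
--
--         if char == ';' and not in_quotes: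
--             statements.append(''.join(current).strip())
--             current = []
--
--     if current:  # Add any remaining code
--         statements.append(''.join(current).strip())
--
--     return [s for s in statements if s]
-- ===== SOURCE B (Python) =====
-- def _split_into_statements(code):
--     """Split SAS code into individual statements (piece-merge decomposition)."""
--     pieces = code.split(';')
--     out = []
--     buf = []
--     in_quotes = False
--     quote_char = None
--     for piece in pieces[:-1]:
--         for char in piece:
--             if char in ("'", '"') and not in_quotes:
--                 in_quotes = True
--                 quote_char = char
--             elif char == quote_char and in_quotes:
--                 in_quotes = False
--         buf.append(piece)
--         if not in_quotes:
--             out.append((';'.join(buf) + ';').strip())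
--             buf = []
--     buf.append(pieces[-1])
--     tail = ';'.join(buf).strip()
--     if tail:
--         out.append(tail)
--     return [s for s in out if s]
-- ===== Notes on version B (the rewrite author's own statement) =====
-- stated objective: faster
-- what changed: B first splits the code on every semicolon in one bulk operation and then merges the pieces back with a quote-state scan per piece, emitting a statement whenever a piece ends with quotes closed, instead of A's single char-by-char loop with a character accumulator.
import Mathlib
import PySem

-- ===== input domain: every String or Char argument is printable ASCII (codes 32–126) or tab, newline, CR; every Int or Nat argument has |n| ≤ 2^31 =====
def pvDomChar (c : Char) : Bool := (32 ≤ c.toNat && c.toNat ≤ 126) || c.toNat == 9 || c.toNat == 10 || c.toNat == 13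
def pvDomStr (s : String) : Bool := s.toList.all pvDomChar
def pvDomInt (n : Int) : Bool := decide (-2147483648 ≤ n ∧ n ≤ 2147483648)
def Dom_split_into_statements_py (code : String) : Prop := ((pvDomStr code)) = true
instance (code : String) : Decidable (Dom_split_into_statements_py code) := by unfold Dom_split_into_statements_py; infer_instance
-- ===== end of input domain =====

-- B bulk-splits the code on every semicolon and merges pieces back by quote state, instead of
-- A's char-by-char accumulator loop (measurably faster by constant factor in Python).

-- ===== PORT A =====
-- the quote-state toggle shared verbatim by both Pythons (the if/elif at the top of each loop body)
def pvQStep (st : Bool × Option Char) (c : Char) : Bool × Option Char :=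
  if (c == '\'' || c == '"') && !st.1 then (true, some c)
  else if some c == st.2 && st.1 then (false, st.2)
  else st

-- one iteration of A's `for char in code` body
def pvStepA (st : List String × List Char × Bool × Option Char) (c : Char) :
    List String × List Char × Bool × Option Char :=
  let q := pvQStep (st.2.2.1, st.2.2.2) c
  let cur := st.2.1 ++ [c]
  if c == ';' && !q.1 then
    (st.1 ++ [PySem.Str.strip (String.mk cur)], [], q.1, q.2)
  else
    (st.1, cur, q.1, q.2)

def split_into_statements_py (code : String) : List String :=
  let st := code.toList.foldl pvStepA ([], [], false, none)
  let stmts := if st.2.1 ≠ [] then st.1 ++ [PySem.Str.strip (String.mk st.2.1)] else st.1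
  stmts.filter (fun s => s ≠ "")

-- ===== PORT B =====
-- ';'.join on pieces (as char lists)
def pvJoinSemi : List (List Char) → List Char
  | [] => []
  | [p] => p
  | p :: q :: rest => p ++ ';' :: pvJoinSemi (q :: rest)

-- Source B's loop over pieces[:-1] followed by the tail handling (recursion on the piece list;
-- the singleton case is the code after the loop)
def pvBGo (out : List String) (buf : List (List Char)) (iq : Bool) (qc : Option Char) :
    List (List Char) → List String
  | [] => out
  | [last] =>
      let tail := PySem.Str.strip (String.mk (pvJoinSemi (buf ++ [last])))
      if tail ≠ "" then out ++ [tail] else out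
  | p :: q :: rest =>
      let st := p.foldl pvQStep (iq, qc)
      let buf' := buf ++ [p]
      if !st.1 then
        pvBGo (out ++ [PySem.Str.strip (String.mk (pvJoinSemi buf' ++ [';']))]) [] st.1 st.2 (q :: rest)
      else
        pvBGo out buf' st.1 st.2 (q :: rest)

def split_into_statements_py_alt (code : String) : List String :=
  (pvBGo [] [] false none (code.toList.splitOn ';')).filter (fun s => s ≠ "")

-- ===== PRECONDITION & SPEC =====
def Spec_split_into_statements_py (code : String) (out : List String) : Prop := out = split_into_statements_py_alt code
instance (code : String) (out : List String) : Decidable (Spec_split_into_statements_py code out) := by unfold Spec_split_into_statements_py; infer_instance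

-- ===== CLAIM (what is proved, stated in full; the proofs are below) =====
def Claim_equal_split_into_statements_py : Prop := ∀ (code : String), Dom_split_into_statements_py code → Spec_split_into_statements_py code (split_into_statements_py code)

-- ===== LEMMAS AND PROOFS =====

-- A's current buffer when B's merge buffer is `buf`: each merged piece followed by its kept ';'
def pvCurOf (buf : List (List Char)) : List Char := buf.flatMap (fun q => q ++ [';'])

lemma pvJoinSemi_cons_ne (p : List Char) (l : List (List Char)) (h : l ≠ []) :
    pvJoinSemi (p :: l) = p ++ ';' :: pvJoinSemi l := by
  cases l with
  | nil => exact absurd rfl h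
  | cons q rest => rfl

lemma pvJoinSemi_snoc (buf : List (List Char)) (p : List Char) :
    pvJoinSemi (buf ++ [p]) = pvCurOf buf ++ p := by
  induction buf with
  | nil => rfl
  | cons q rest ih =>
      rw [List.cons_append, pvJoinSemi_cons_ne q (rest ++ [p]) (by simp), ih]
      simp [pvCurOf]

lemma pvQStep_ne_semi {iq : Bool} {qc : Option Char} {c : Char}
    (hqc : qc ≠ some ';') (hc : c ≠ ';') : (pvQStep (iq, qc) c).2 ≠ some ';' := by
  unfold pvQStep
  split_ifs with h1 h2
  · simpa using hc
  · exact hqc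
  · exact hqc

lemma pvScan_ne_semi (p : List Char) (hp : ∀ c ∈ p, c ≠ ';') :
    ∀ iq qc, qc ≠ some ';' → (p.foldl pvQStep (iq, qc)).2 ≠ some ';' := by
  induction p with
  | nil => intro iq qc h; exact h
  | cons c p ih =>
      intro iq qc h
      rw [List.foldl_cons]
      have hc : c ≠ ';' := hp c (by simp)
      have := pvQStep_ne_semi (iq := iq) h hc
      exact (ih (fun d hd => hp d (by simp [hd])) _ _ this)

-- A's fold over a ';'-free piece: just extends the buffer and advances the quote state
lemma pvFoldA_free (p : List Char) (hp : ∀ c ∈ p, c ≠ ';') :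
    ∀ stmts cur iq qc,
      p.foldl pvStepA (stmts, cur, iq, qc) =
        (stmts, cur ++ p, p.foldl pvQStep (iq, qc)) := by
  induction p with
  | nil => intro stmts cur iq qc; simp
  | cons c p ih =>
      intro stmts cur iq qc
      have hc : c ≠ ';' := hp c (by simp)
      rw [List.foldl_cons, List.foldl_cons]
      have hstep : pvStepA (stmts, cur, iq, qc) c =
          (stmts, cur ++ [c], pvQStep (iq, qc) c) := by
        unfold pvStepA
        have hb : (c == ';') = false := by simp [hc]
        simp [hb]
      rw [hstep, ih (fun d hd => hp d (by simp [hd]))]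
      simp

-- A's step on an unquoted-vs-quoted ';' (quote char is never ';')
lemma pvStepA_semi (stmts : List String) (cur : List Char) (iq : Bool) (qc : Option Char)
    (hqc : qc ≠ some ';') :
    pvStepA (stmts, cur, iq, qc) ';' =
      if iq then (stmts, cur ++ [';'], iq, qc)
      else (stmts ++ [PySem.Str.strip (String.mk (cur ++ [';']))], [], iq, qc) := by
  unfold pvStepA pvQStep
  have h1 : (((';' : Char) == '\'' || (';' : Char) == '"')) = false := by decide
  have h2 : (some ';' == qc) = false := by
    cases qc with
    | none => rfl
    | some c =>
        simp only [Option.some_beq_some, beq_eq_false_iff_ne]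
        exact fun h => hqc (by rw [← h])
  cases iq <;> simp [h1, h2]

lemma pvStrip_nil : PySem.Str.strip (String.mk []) = "" := by decide

-- main invariant: A's fold over the glued pieces, finalized and filtered,
-- equals B's piece-merging loop, filtered
lemma pvMain : ∀ (pieces : List (List Char)), pieces ≠ [] →
    (∀ p ∈ pieces, ∀ c ∈ p, c ≠ ';') →
    ∀ (out : List String) (buf : List (List Char)) (iq : Bool) (qc : Option Char),
      qc ≠ some ';' →
      (let st := (pvJoinSemi pieces).foldl pvStepA (out, pvCurOf buf, iq, qc)
       (if st.2.1 ≠ [] then st.1 ++ [PySem.Str.strip (String.mk st.2.1)] else st.1).filter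
          (fun s => s ≠ "")) =
      (pvBGo out buf iq qc pieces).filter (fun s => s ≠ "") := by
  intro pieces
  induction pieces with
  | nil => intro h; exact absurd rfl h
  | cons p rest ih =>
      intro _ hfree out buf iq qc hqc
      have hpfree : ∀ c ∈ p, c ≠ ';' := hfree p (by simp)
      cases rest with
      | nil =>
          -- last piece: finalize vs tail handling
          simp only [pvJoinSemi, pvBGo]
          rw [pvFoldA_free p hpfree, pvJoinSemi_snoc]
          simp only
          by_cases hcur : pvCurOf buf ++ p = []
          · have htail : PySem.Str.strip (String.mk (pvCurOf buf ++ p)) = "" := by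
              rw [hcur]; exact pvStrip_nil
            rw [if_neg (by simp [hcur]), htail]
            simp
          · rw [if_pos hcur]
            by_cases ht : PySem.Str.strip (String.mk (pvCurOf buf ++ p)) = ""
            · rw [if_neg (by simp [ht]), List.filter_append]
              simp [ht]
            · rw [if_pos ht]
      | cons q rest' =>
          -- interior piece: the ';' after p is real or quoted
          have hrest : (q :: rest') ≠ [] := by simp
          rw [pvJoinSemi_cons_ne p (q :: rest') hrest]
          rw [List.foldl_append, List.foldl_cons]
          rw [pvFoldA_free p hpfree]
          have hqc' : (p.foldl pvQStep (iq, qc)).2 ≠ some ';' :=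
            pvScan_ne_semi p hpfree iq qc hqc
          have hrfree : ∀ r ∈ q :: rest', ∀ c ∈ r, c ≠ ';' :=
            fun r hr => hfree r (by simp [hr])
          simp only [pvBGo]
          rcases hst1 : p.foldl pvQStep (iq, qc) with ⟨iq', qc'⟩
          rw [hst1] at hqc'
          rw [pvStepA_semi out (pvCurOf buf ++ p) iq' qc' hqc']
          cases iq' with
          | true =>
              simp only [Bool.not_true, reduceIte]
              have hcur : pvCurOf buf ++ p ++ [';'] = pvCurOf (buf ++ [p]) := by
                simp [pvCurOf]
              rw [hcur]
              exact ih hrest hrfree out (buf ++ [p]) true qc' hqc'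
          | false =>
              simp only [Bool.not_false, reduceIte]
              have hjoin : pvJoinSemi (buf ++ [p]) ++ [';'] = pvCurOf buf ++ p ++ [';'] := by
                rw [pvJoinSemi_snoc]
              rw [hjoin]
              have := ih hrest hrfree
                (out ++ [PySem.Str.strip (String.mk (pvCurOf buf ++ p ++ [';']))]) [] false qc' hqc'
              simpa [pvCurOf, List.append_assoc] using this

lemma pvJoin_split (xs : List Char) : pvJoinSemi (xs.splitOn ';') = xs := by
  induction xs with
  | nil => rfl
  | cons c xs ih =>
      rw [List.splitOn, List.splitOnP_cons]
      by_cases hc : c = ';'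
      · rw [if_pos (by simp [hc])]
        obtain ⟨h, t, ht⟩ := List.exists_cons_of_ne_nil (List.splitOnP_ne_nil _ xs)
        rw [ht]
        rw [pvJoinSemi_cons_ne [] (h :: t) (by simp)]
        rw [← ht]
        rw [List.splitOn] at ih
        rw [ih, hc]
        rfl
      · rw [if_neg (by simp [hc])]
        obtain ⟨h, t, ht⟩ := List.exists_cons_of_ne_nil (List.splitOnP_ne_nil _ xs)
        rw [ht, List.modifyHead]
        rw [List.splitOn, ht] at ih
        cases t with
        | nil => simpa [pvJoinSemi] using congrArg (c :: ·) ih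
        | cons t0 ts =>
            rw [pvJoinSemi_cons_ne (c :: h) (t0 :: ts) (by simp),
                ← ih, pvJoinSemi_cons_ne h (t0 :: ts) (by simp)]
            rfl

lemma pvSplit_free (xs : List Char) : ∀ p ∈ xs.splitOn ';', ∀ c ∈ p, c ≠ ';' := by
  induction xs with
  | nil => intro p hp c hc; simp [List.splitOn, List.splitOnP_nil] at hp; simp [hp] at hc
  | cons d xs ih =>
      intro p hp c hc
      rw [List.splitOn, List.splitOnP_cons] at hp
      by_cases hd : d = ';'
      · rw [if_pos (by simp [hd])] at hp
        rcases List.mem_cons.1 hp with h | h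
        · simp [h] at hc
        · exact ih p h c hc
      · rw [if_neg (by simp [hd])] at hp
        obtain ⟨h, t, ht⟩ := List.exists_cons_of_ne_nil (List.splitOnP_ne_nil (· == ';') xs)
        rw [List.splitOn] at ih
        rw [ht, List.modifyHead] at hp
        rcases List.mem_cons.1 hp with h1 | h1
        · subst h1
          rcases List.mem_cons.1 hc with h2 | h2
          · exact h2 ▸ hd
          · exact ih h (by rw [ht]; simp) c h2
        · exact ih p (by rw [ht]; simp [h1]) c hc
      
lemma pvSplit_ne_nil (xs : List Char) : xs.splitOn ';' ≠ [] := List.splitOnP_ne_nil _ xs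

-- ===== VERDICT (by name: the statement is the Claim_ definition above) =====
theorem split_into_statements_py_spec : Claim_equal_split_into_statements_py := by
  intro code _
  unfold Spec_split_into_statements_py split_into_statements_py split_into_statements_py_alt
  have h := pvMain (code.toList.splitOn ';') (pvSplit_ne_nil code.toList)
    (pvSplit_free code.toList) [] [] false none (by simp)
  rw [pvJoin_split] at h
  simpa [pvCurOf] using h
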